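-- pv_equiv track=rewrite | github.com/andreyvaran/Tasks_and_History | Algoritms/Task33.py | genom_dict
-- ===== SOURCE A (Python) =====
-- def genom_dict(gen : str ):
--     res = dict()
--     for i in range(len(gen)-1):
--         try:
--             res[gen[i]+gen[i+1]]+=1
--         except KeyError :
--             res[gen[i]+gen[i+1]] = 1
--     return res
-- ===== SOURCE B (Python) =====
-- def genom_dict(gen: str):
--     # Different decomposition: build the bigram list once, then dedup the
--     # distinct bigrams (first-occurrence order) and count each one in a
--     # comprehension, instead of incrementally counting in a single pass.
--     pairs = [a + b for a, b in zip(gen, gen[1:])]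
--     return {p: pairs.count(p) for p in dict.fromkeys(pairs)}
-- ===== Notes on version B (the rewrite author's own statement) =====
-- stated objective: alternative
-- what changed: Replaces the incremental try/except counting loop by a dedup-then-count decomposition: build the bigram list via zip, take its distinct elements with dict.fromkeys, and compute each key's total with pairs.count in a dict comprehension.
import Mathlib
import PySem

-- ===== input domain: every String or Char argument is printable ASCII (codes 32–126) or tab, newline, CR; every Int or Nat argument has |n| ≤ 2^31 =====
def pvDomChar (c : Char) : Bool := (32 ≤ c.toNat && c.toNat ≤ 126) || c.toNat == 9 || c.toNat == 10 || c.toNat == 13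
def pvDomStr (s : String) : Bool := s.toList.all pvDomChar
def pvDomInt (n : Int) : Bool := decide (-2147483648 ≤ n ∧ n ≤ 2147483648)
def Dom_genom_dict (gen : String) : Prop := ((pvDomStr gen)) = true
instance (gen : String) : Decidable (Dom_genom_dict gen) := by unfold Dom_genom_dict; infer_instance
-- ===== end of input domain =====

-- B replaces A's incremental try/except counting loop by a dedup-then-count
-- decomposition (build the bigram list, dedup it, count each distinct bigram); alternative, not faster.

-- ===== PORT A =====
-- gen[i]+gen[i+1] (the .getD ' ' defaults are unreachable: every index drawn from the range is in bounds)
def pvKeyA (cs : List Char) (i : Int) : String :=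
  String.ofList [((PySem.List.pyGet? cs i).getD ' '), ((PySem.List.pyGet? cs (i + 1)).getD ' ')]

-- for i in range(len(gen)-1): try: res[gen[i]+gen[i+1]] += 1 except KeyError: res[gen[i]+gen[i+1]] = 1
def genom_dict (gen : String) : List (String × Int) :=
  let cs := gen.toList
  let res := (PySem.List.pyRange 0 ((cs.length : Int) - 1) 1).foldl
    (fun d i =>
      let key := pvKeyA cs i
      if d.contains key then d.insert key (d.getD key 0 + 1) else d.insert key 1)
    PySem.Dict.empty
  res.items

-- ===== PORT B =====
-- pairs = [a + b for a, b in zip(gen, gen[1:])]; {p: pairs.count(p) for p in dict.fromkeys(pairs)}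
def genom_dict_alt (gen : String) : List (String × Int) :=
  let cs := gen.toList
  let pairs := (cs.zip (cs.drop 1)).map (fun ab => String.ofList [ab.1, ab.2])
  ((PySem.List.dedup pairs).foldl
    (fun d p => d.insert p ((pairs.count p : Int))) PySem.Dict.empty).items

-- ===== PRECONDITION & SPEC =====
def Spec_genom_dict (gen : String) (out : List (String × Int)) : Prop := out = genom_dict_alt gen
instance (gen : String) (out : List (String × Int)) : Decidable (Spec_genom_dict gen out) := by unfold Spec_genom_dict; infer_instance

-- ===== CLAIM (what is proved, stated in full; the proofs are below) =====
def Claim_equal_genom_dict : Prop := ∀ (gen : String), Dom_genom_dict gen → Spec_genom_dict gen (genom_dict gen)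

-- ===== LEMMAS AND PROOFS =====

-- A's index loop reads exactly B's zip-built bigram list
lemma pvPairs_eq (cs : List Char) :
    (PySem.List.pyRange 0 ((cs.length : Int) - 1) 1).map (pvKeyA cs)
      = (cs.zip (cs.drop 1)).map (fun ab => String.ofList [ab.1, ab.2]) := by
  cases cs with
  | nil => rfl
  | cons c t =>
    have h1 : ((List.length (c :: t) : Int) - 1) = ((t.length : Nat) : Int) := by simp
    rw [h1, PySem.List.pyRange_zero_natCast, List.map_map]
    apply List.ext_getElem
    · simp
    · intro j hj hj2
      have hjn : j < t.length := by simpa using hj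
      simp only [List.getElem_map, Function.comp, List.getElem_zip, pvKeyA,
        List.getElem_range]
      have e1 : PySem.List.pyGet? (c :: t) ((j : Int)) = (c :: t)[j]? := PySem.List.pyGet?_natCast _ j
      have e2 : ((j : Int) + 1) = ((j + 1 : Nat) : Int) := by push_cast; ring
      rw [e1, e2, PySem.List.pyGet?_natCast]
      have g1 : (c :: t)[j]? = some ((c :: t)[j]'(by simp; omega)) := List.getElem?_eq_getElem _
      have g2 : (c :: t)[j+1]? = some ((c :: t)[j+1]'(by simp; omega)) := List.getElem?_eq_getElem _
      rw [g1, g2]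
      simp

-- A's fold is Counter(pairs)
lemma pvA_counter (cs : List Char) :
    (PySem.List.pyRange 0 ((cs.length : Int) - 1) 1).foldl
      (fun d i =>
        let key := pvKeyA cs i
        if d.contains key then d.insert key (d.getD key 0 + 1) else d.insert key 1)
      PySem.Dict.empty
    = PySem.Dict.counter ((cs.zip (cs.drop 1)).map (fun ab => String.ofList [ab.1, ab.2])) := by
  have hstep : ∀ (d : PySem.Dict String Int), ∀ i ∈ PySem.List.pyRange 0 ((cs.length : Int) - 1) 1,
      (fun d i =>
        let key := pvKeyA cs i
        if d.contains key then d.insert key (d.getD key 0 + 1) else d.insert key 1) d i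
      = d.insert (pvKeyA cs i) (d.getD (pvKeyA cs i) 0 + 1) := by
    intro d i _
    simp only
    by_cases h : d.contains (pvKeyA cs i)
    · simp [h]
    · rw [if_neg (by simpa using h), PySem.Dict.getD_of_not_contains d 0 (by simpa using h)]; norm_num
  rw [PySem.List.foldl_congr_mem _ _ _ _ hstep,
    ← List.foldl_map (f := pvKeyA cs)
      (g := fun (d : PySem.Dict String Int) k => d.insert k (d.getD k 0 + 1)),
    pvPairs_eq cs, PySem.Dict.foldl_insert_getD_add_one_eq_counter]

-- ===== VERDICT (by name: the statement is the Claim_ definition above) =====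
theorem genom_dict_spec : Claim_equal_genom_dict := by
  intro gen _
  unfold Spec_genom_dict genom_dict genom_dict_alt
  simp only
  rw [pvA_counter, PySem.Dict.items_counter]
  rw [PySem.Dict.items_foldl_insert_fresh _ (fun p => p)
      (fun p => ((((gen.toList.zip (gen.toList.drop 1)).map (fun ab => String.ofList [ab.1, ab.2])).count p : Nat) : Int))
      PySem.Dict.empty
      (by intro a _; simp [PySem.Dict.contains_empty])
      (by simpa using PySem.Set.nodup_ofList ((gen.toList.zip (gen.toList.drop 1)).map (fun ab => String.ofList [ab.1, ab.2])))]
  simp [PySem.List.dedup]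
  rfl
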